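-- pv_equiv track=rewrite | github.com/rustic-ai/kniv-nlp-models | models/deberta-v3-large-nlp-en/dep2label.py | _resolve_offset
-- ===== SOURCE A (Python) =====
-- def _resolve_offset(
--     token_idx: int,
--     offset: int,
--     upos_tags: list[str],
--     head_upos: str,
-- ) -> int | None:
--     """Resolve a signed offset back to an absolute head index."""
--     n = len(upos_tags)
--
--     if offset > 0:
--         # Scan right
--         count = 0
--         for j in range(token_idx + 1, n):
--             if upos_tags[j] == head_upos:
--                 count += 1
--             if count == offset:
--                 return j
--     elif offset < 0:
--         # Scan left
--         count = 0
--         for j in range(token_idx - 1, -1, -1):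
--             if upos_tags[j] == head_upos:
--                 count -= 1
--             if count == offset:
--                 return j
--     else:
--         # offset == 0 with non-root: shouldn't happen, but handle gracefully
--         return None
--
--     return None
-- ===== SOURCE B (Python) =====
-- def _resolve_offset(
--     token_idx: int,
--     offset: int,
--     upos_tags: list[str],
--     head_upos: str,
-- ) -> int | None:
--     """Resolve a signed offset back to an absolute head index."""
--     if offset == 0:
--         return None
--     n = len(upos_tags)
--     if offset > 0:
--         matches = [j for j in range(token_idx + 1, n) if upos_tags[j] == head_upos]
--         k = offset - 1
--     else:
--         matches = [j for j in range(token_idx - 1, -1, -1) if upos_tags[j] == head_upos]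
--         k = -offset - 1
--     return matches[k] if k < len(matches) else None
-- ===== Notes on version B (the rewrite author's own statement) =====
-- stated objective: simpler
-- what changed: Replaces the single-pass count-with-early-exit loop by collect-all-matching-indices-then-select-the-k-th: a comprehension gathers the matching indices on the chosen side and the answer is matches[k] (k = offset-1 or -offset-1) when in range, else None.
import Mathlib
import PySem

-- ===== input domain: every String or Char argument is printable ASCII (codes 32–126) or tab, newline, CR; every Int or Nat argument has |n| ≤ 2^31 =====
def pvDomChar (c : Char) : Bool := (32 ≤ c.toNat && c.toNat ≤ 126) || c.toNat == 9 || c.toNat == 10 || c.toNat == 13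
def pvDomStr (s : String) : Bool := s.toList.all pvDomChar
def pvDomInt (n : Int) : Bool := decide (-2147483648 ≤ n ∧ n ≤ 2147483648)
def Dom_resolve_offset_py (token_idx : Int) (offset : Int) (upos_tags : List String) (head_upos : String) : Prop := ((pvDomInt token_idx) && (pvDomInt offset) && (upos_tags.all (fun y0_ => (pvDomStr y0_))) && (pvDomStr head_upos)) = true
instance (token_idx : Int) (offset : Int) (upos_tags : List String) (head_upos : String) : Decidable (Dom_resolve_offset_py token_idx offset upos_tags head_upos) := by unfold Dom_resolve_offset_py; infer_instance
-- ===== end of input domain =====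

-- B replaces A's count-with-early-exit scan by collect-matching-indices-then-select-k-th; objective: simpler.

-- ===== PORT A =====
-- rightward scan: for j in range(token_idx+1, n): count += (tag==h); if count == offset: return j
def pvLoopR (upos : List String) (h : String) (off : Int) : List Int → Int → Option Int
  | [], _ => none
  | j :: rest, count =>
    match PySem.List.pyGet? upos j with
    | none => none  -- IndexError in Python (excluded by Pre_)
    | some t =>
      let count' := if t == h then count + 1 else count
      if count' == off then some j else pvLoopR upos h off rest count'

-- leftward scan: for j in range(token_idx-1, -1, -1): count -= (tag==h); if count == offset: return j
def pvLoopL (upos : List String) (h : String) (off : Int) : List Int → Int → Option Int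
  | [], _ => none
  | j :: rest, count =>
    match PySem.List.pyGet? upos j with
    | none => none  -- IndexError in Python (excluded by Pre_)
    | some t =>
      let count' := if t == h then count - 1 else count
      if count' == off then some j else pvLoopL upos h off rest count'

def resolve_offset_py (token_idx : Int) (offset : Int) (upos_tags : List String) (head_upos : String) : Option Int :=
  let n : Int := upos_tags.length
  if offset > 0 then
    pvLoopR upos_tags head_upos offset (PySem.List.pyRange (token_idx + 1) n 1) 0
  else if offset < 0 then
    pvLoopL upos_tags head_upos offset (PySem.List.pyRange (token_idx - 1) (-1) (-1)) 0
  else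
    none

-- ===== PORT B =====
-- upos_tags[j] == head_upos (none = IndexError, excluded by Pre_)
def pvMatch (upos : List String) (h : String) (j : Int) : Bool :=
  match PySem.List.pyGet? upos j with
  | some t => t == h
  | none => false

def resolve_offset_py_alt (token_idx : Int) (offset : Int) (upos_tags : List String) (head_upos : String) : Option Int :=
  if offset == 0 then none
  else
    let n : Int := upos_tags.length
    let mk :=
      if offset > 0 then
        ((PySem.List.pyRange (token_idx + 1) n 1).filter (pvMatch upos_tags head_upos), offset - 1)
      else
        ((PySem.List.pyRange (token_idx - 1) (-1) (-1)).filter (pvMatch upos_tags head_upos), -offset - 1)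
    if mk.2 < (mk.1.length : Int) then PySem.List.pyGet? mk.1 mk.2 else none

-- ===== PRECONDITION & SPEC =====
-- Pre_ excludes exactly the inputs where the first index A's scan touches is out of range, so Python A
-- (and B alike) raises IndexError: offset>0 with token_idx+1 < -len, or offset<0 with token_idx > len.
def Pre_resolve_offset_py (token_idx : Int) (offset : Int) (upos_tags : List String) (head_upos : String) : Prop :=
  (0 < offset → -(upos_tags.length : Int) ≤ token_idx + 1) ∧ (offset < 0 → token_idx ≤ (upos_tags.length : Int))
instance (token_idx : Int) (offset : Int) (upos_tags : List String) (head_upos : String) : Decidable (Pre_resolve_offset_py token_idx offset upos_tags head_upos) := by unfold Pre_resolve_offset_py; infer_instance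

def pvWitness_resolve_offset_py : Int × Int × List String × String := (1, 1, ["NOUN", "VERB", "VERB"], "VERB")

def Spec_resolve_offset_py (token_idx : Int) (offset : Int) (upos_tags : List String) (head_upos : String) (out : Option Int) : Prop := out = resolve_offset_py_alt token_idx offset upos_tags head_upos
instance (token_idx : Int) (offset : Int) (upos_tags : List String) (head_upos : String) (out : Option Int) : Decidable (Spec_resolve_offset_py token_idx offset upos_tags head_upos out) := by unfold Spec_resolve_offset_py; infer_instance

-- ===== CLAIM (what is proved, stated in full; the proofs are below) =====
def Claim_equal_resolve_offset_py : Prop := ∀ (token_idx : Int) (offset : Int) (upos_tags : List String) (head_upos : String), Dom_resolve_offset_py token_idx offset upos_tags head_upos → Pre_resolve_offset_py token_idx offset upos_tags head_upos → Spec_resolve_offset_py token_idx offset upos_tags head_upos (resolve_offset_py token_idx offset upos_tags head_upos)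

-- ===== LEMMAS AND PROOFS =====

lemma pvLoopR_eq (upos : List String) (h : String) (off : Int) :
    ∀ (idxs : List Int) (count : Int), count < off →
      (∀ j ∈ idxs, PySem.Raise.InRange upos.length j) →
      pvLoopR upos h off idxs count =
        (let m := idxs.filter (pvMatch upos h)
         if off - count - 1 < (m.length : Int) then m[(off - count - 1).toNat]? else none) := by
  intro idxs
  induction idxs with
  | nil =>
    intro count hlt _
    simp [pvLoopR]
  | cons j rest ih =>
    intro count hlt hin
    have hj : PySem.Raise.InRange upos.length j := hin j (by simp)
    obtain ⟨t, ht⟩ : ∃ t, PySem.List.pyGet? upos j = some t :=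
      Option.ne_none_iff_exists'.mp
        (fun hg => absurd hj (by rw [← PySem.List.pyGet?_eq_none_iff, hg]))
    have hrest : ∀ x ∈ rest, PySem.Raise.InRange upos.length x :=
      fun x hx => hin x (by simp [hx])
    simp only [pvLoopR, ht]
    by_cases hm : (t == h) = true
    · rw [if_pos hm]
      have hfil : (j :: rest).filter (pvMatch upos h) = j :: rest.filter (pvMatch upos h) := by
        simp [List.filter, pvMatch, ht, hm]
      by_cases heq : count + 1 = off
      · rw [if_pos (show ((count + 1 == off) = true) by simp [heq]), hfil]
        have h0 : off - count - 1 = 0 := by omega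
        rw [h0]
        simp
      · rw [if_neg (show ¬((count + 1 == off) = true) by simp [heq])]
        rw [ih (count + 1) (by omega) hrest, hfil]
        have hK : (off - count - 1).toNat = (off - (count + 1) - 1).toNat + 1 := by omega
        simp only [List.length_cons, hK, List.getElem?_cons_succ]
        congr 1
        simp only [eq_iff_iff]
        push_cast
        omega
    · rw [if_neg hm]
      rw [if_neg (show ¬((count == off) = true) by simp; omega)]
      rw [ih count hlt hrest]
      have hfil : (j :: rest).filter (pvMatch upos h) = rest.filter (pvMatch upos h) := by
        simp [List.filter, pvMatch, ht, hm]
      simp [hfil]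

lemma pvLoopL_eq (upos : List String) (h : String) (off : Int) :
    ∀ (idxs : List Int) (count : Int), off < count →
      (∀ j ∈ idxs, PySem.Raise.InRange upos.length j) →
      pvLoopL upos h off idxs count =
        (let m := idxs.filter (pvMatch upos h)
         if count - off - 1 < (m.length : Int) then m[(count - off - 1).toNat]? else none) := by
  intro idxs
  induction idxs with
  | nil =>
    intro count hlt _
    simp [pvLoopL]
  | cons j rest ih =>
    intro count hlt hin
    have hj : PySem.Raise.InRange upos.length j := hin j (by simp)
    obtain ⟨t, ht⟩ : ∃ t, PySem.List.pyGet? upos j = some t :=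
      Option.ne_none_iff_exists'.mp
        (fun hg => absurd hj (by rw [← PySem.List.pyGet?_eq_none_iff, hg]))
    have hrest : ∀ x ∈ rest, PySem.Raise.InRange upos.length x :=
      fun x hx => hin x (by simp [hx])
    simp only [pvLoopL, ht]
    by_cases hm : (t == h) = true
    · rw [if_pos hm]
      have hfil : (j :: rest).filter (pvMatch upos h) = j :: rest.filter (pvMatch upos h) := by
        simp [List.filter, pvMatch, ht, hm]
      by_cases heq : count - 1 = off
      · rw [if_pos (show ((count - 1 == off) = true) by simp [heq]), hfil]
        have h0 : count - off - 1 = 0 := by omega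
        rw [h0]
        simp
      · rw [if_neg (show ¬((count - 1 == off) = true) by simp [heq])]
        rw [ih (count - 1) (by omega) hrest, hfil]
        have hK : (count - off - 1).toNat = ((count - 1) - off - 1).toNat + 1 := by omega
        simp only [List.length_cons, hK, List.getElem?_cons_succ]
        congr 1
        simp only [eq_iff_iff]
        push_cast
        omega
    · rw [if_neg hm]
      rw [if_neg (show ¬((count == off) = true) by simp; omega)]
      rw [ih count hlt hrest]
      have hfil : (j :: rest).filter (pvMatch upos h) = rest.filter (pvMatch upos h) := by
        simp [List.filter, pvMatch, ht, hm]
      simp [hfil]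

-- InRange for all indices of the rightward scan, under Pre_
lemma pvInRangeR (upos : List String) (tid : Int) (hpre : -(upos.length : Int) ≤ tid + 1) :
    ∀ j ∈ PySem.List.pyRange (tid + 1) (upos.length : Int) 1, PySem.Raise.InRange upos.length j := by
  intro j hj
  rw [PySem.List.mem_pyRange_one] at hj
  exact ⟨by omega, hj.2⟩

-- InRange for all indices of the leftward scan, under Pre_
lemma pvInRangeL (upos : List String) (tid : Int) (hpre : tid ≤ (upos.length : Int)) :
    ∀ j ∈ PySem.List.pyRange (tid - 1) (-1) (-1), PySem.Raise.InRange upos.length j := by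
  intro j hj
  rw [PySem.List.mem_pyRange_neg_one] at hj
  exact ⟨by omega, by omega⟩

-- ===== VERDICT (by name: the statement is the Claim_ definition above) =====
theorem resolve_offset_py_spec : Claim_equal_resolve_offset_py := by
  intro tid off upos h _ hpre
  unfold Spec_resolve_offset_py resolve_offset_py resolve_offset_py_alt
  rcases hpre with ⟨hR, hL⟩
  by_cases hpos : off > 0
  · rw [if_pos hpos, if_neg (by simp; omega)]
    rw [pvLoopR_eq upos h off _ 0 hpos (pvInRangeR upos tid (hR hpos))]
    simp only [if_pos hpos]
    have hk : 0 ≤ off - 1 := by omega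
    rw [PySem.List.pyGet?_of_nonneg _ hk]
    have : off - 0 - 1 = off - 1 := by omega
    rw [this]
  · by_cases hneg : off < 0
    · rw [if_neg hpos, if_pos hneg, if_neg (by simp; omega)]
      rw [pvLoopL_eq upos h off _ 0 hneg (pvInRangeL upos tid (hL hneg))]
      simp only [if_neg hpos]
      have hk : 0 ≤ -off - 1 := by omega
      rw [PySem.List.pyGet?_of_nonneg _ hk]
      have : 0 - off - 1 = -off - 1 := by omega
      rw [this]
    · have h0 : off = 0 := by omega
      simp [h0]
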